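-- pv_equiv track=rewrite | github.com/FORIFOR/wake-saiteku | utils/text_utils.py | _minimal_repeating_unit
-- ===== SOURCE A (Python) =====
-- from typing import List, Tuple
--
-- def _minimal_repeating_unit(s: str) -> Tuple[str, int]:
--     """最小の繰り返し単位と繰り返し回数を返す。
--     例: 'abcabcabc' -> ('abc', 3), 'aaaa' -> ('a', 4), 'abcab' -> ('abcab', 1)
--     """
--     n = len(s)
--     if n == 0:
--         return s, 0
--     # KMPのlps（部分一致テーブル）
--     lps = [0] * n
--     j = 0
--     for i in range(1, n):
--         while j > 0 and s[i] != s[j]: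
--             j = lps[j - 1]
--         if s[i] == s[j]:
--             j += 1
--             lps[i] = j
--     p = n - lps[-1]  # 推定周期
--     if p != 0 and n % p == 0:
--         unit = s[:p]
--         times = n // p
--         return unit, times
--     return s, 1
-- ===== SOURCE B (Python) =====
-- def _minimal_repeating_unit(s):
--     n = len(s)
--     if n == 0:
--         return s, 0
--     # smallest shift p >= 1 under which s matches itself; p == n always qualifies
--     p = next(p for p in range(1, n + 1) if s[p:] == s[:n - p])
--     if n % p == 0:
--         return s[:p], n // p
--     return s, 1
-- ===== Notes on version B (the rewrite author's own statement) =====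
-- stated objective: simpler
-- what changed: Replaces the KMP failure-function table with a direct linear scan for the smallest self-overlap shift p (first p in 1..n with s[p:] == s[:n-p]), then the same divisibility test.
import Mathlib
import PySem

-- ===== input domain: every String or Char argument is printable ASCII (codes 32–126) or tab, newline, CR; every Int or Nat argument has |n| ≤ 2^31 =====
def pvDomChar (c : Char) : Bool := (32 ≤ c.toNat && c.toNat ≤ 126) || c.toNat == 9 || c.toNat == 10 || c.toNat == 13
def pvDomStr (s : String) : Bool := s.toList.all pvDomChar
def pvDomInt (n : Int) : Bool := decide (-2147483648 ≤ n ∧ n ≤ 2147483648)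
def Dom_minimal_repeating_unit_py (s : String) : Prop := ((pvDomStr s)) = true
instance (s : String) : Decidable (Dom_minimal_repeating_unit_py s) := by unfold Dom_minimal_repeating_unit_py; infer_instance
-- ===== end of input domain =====

-- B replaces A's KMP failure-function table by a direct scan for the smallest
-- self-overlap shift; objective: simpler. Return-value equivalence, no mutation.

-- ===== PORT A =====
-- inner `while j > 0 and s[i] != s[j]: j = lps[j-1]`; fuel makes it total
-- (fuel = starting j suffices: j strictly decreases, proved in the lemmas below)
def pvKmpWhile (l : List Char) (lps : List Nat) (cm : Char) : Nat → Nat → Nat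
  | 0, j => j
  | fuel + 1, j =>
      if j ≠ 0 ∧ l.getD j ' ' ≠ cm then
        pvKmpWhile l lps cm fuel (lps.getD (j - 1) 0)
      else j

-- one iteration of `for i in range(1, n)` over state (lps, j)
def pvKmpStep (l : List Char) (st : List Nat × Nat) (i : Nat) : List Nat × Nat :=
  let lps := st.1
  let j0 := st.2
  let j1 := pvKmpWhile l lps (l.getD i ' ') j0 j0
  if l.getD i ' ' = l.getD j1 ' ' then (lps.set i (j1 + 1), j1 + 1) else (lps, j1)

def minimal_repeating_unit_py (s : String) : String × Int :=
  let l := s.toList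
  let n := l.length
  if n = 0 then (s, 0)
  else
    let st := (List.range' 1 (n - 1)).foldl (pvKmpStep l) (List.replicate n 0, 0)
    let p := n - st.1.getD (n - 1) 0      -- lps[-1]; lps has length n ≥ 1
    if p ≠ 0 ∧ n % p = 0 then (String.ofList (l.take p), ((n / p : Nat) : Int))
    else (s, 1)

-- ===== PORT B =====
-- `next(p for p in range(1, n+1) if s[p:] == s[:n-p])`; p = n always matches,
-- so the `else` arm (p > n, StopIteration) is never reached
def pvFindP (l : List Char) (n : Nat) (p : Nat) : Nat :=
  if _h : p ≤ n then
    if l.drop p = l.take (n - p) then p else pvFindP l n (p + 1)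
  else n
termination_by n + 1 - p

def minimal_repeating_unit_py_alt (s : String) : String × Int :=
  let l := s.toList
  let n := l.length
  if n = 0 then (s, 0)
  else
    let p := pvFindP l n 1
    if n % p = 0 then (String.ofList (l.take p), ((n / p : Nat) : Int))
    else (s, 1)

-- ===== PRECONDITION & SPEC =====
def Spec_minimal_repeating_unit_py (s : String) (out : String × Int) : Prop := out = minimal_repeating_unit_py_alt s
instance (s : String) (out : String × Int) : Decidable (Spec_minimal_repeating_unit_py s out) := by unfold Spec_minimal_repeating_unit_py; infer_instance

-- ===== CLAIM (what is proved, stated in full; the proofs are below) =====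
def Claim_equal_minimal_repeating_unit_py : Prop := ∀ (s : String), Dom_minimal_repeating_unit_py s → Spec_minimal_repeating_unit_py s (minimal_repeating_unit_py s)

-- ===== LEMMAS AND PROOFS =====

-- k is a border length of the prefix of length m (pointwise form)
def BrdP (l : List Char) (m k : Nat) : Prop :=
  k < m ∧ ∀ t, t < k → l.getD t ' ' = l.getD (t + m - k) ' '

-- Boolean form of BrdP
def brdB (l : List Char) (m k : Nat) : Bool :=
  decide (k < m) && (List.range k).all (fun t => l.getD t ' ' == l.getD (t + m - k) ' ')

lemma brdB_iff (l : List Char) (m k : Nat) : brdB l m k = true ↔ BrdP l m k := by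
  simp [brdB, BrdP, List.mem_range]

-- longest proper border of the prefix of length m
def mbrd (l : List Char) (m : Nat) : Nat :=
  Nat.findGreatest (fun k => brdB l m k = true) (m - 1)

lemma brdP_zero (l : List Char) (m : Nat) (hm : 0 < m) : BrdP l m 0 :=
  ⟨hm, fun t ht => absurd ht (Nat.not_lt_zero t)⟩

lemma brdP_trans {l : List Char} {i j k : Nat} (h1 : BrdP l i j) (h2 : BrdP l j k) :
    BrdP l i k := by
  obtain ⟨hj, H1⟩ := h1
  obtain ⟨hk, H2⟩ := h2
  refine ⟨hk.trans hj, fun t ht => ?_⟩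
  have e1 := H2 t ht
  have e2 := H1 (t + j - k) (by omega)
  have : t + j - k + i - j = t + i - k := by omega
  rw [e1, e2, this]

lemma brdP_of_lt {l : List Char} {i j k : Nat} (hk : BrdP l i k) (hj : BrdP l i j)
    (hlt : k < j) : BrdP l j k := by
  obtain ⟨_, Hk⟩ := hk
  obtain ⟨hji, Hj⟩ := hj
  refine ⟨hlt, fun t ht => ?_⟩
  have e2 := Hj (t + j - k) (by omega)
  have e1 := Hk t (ht)
  have : t + j - k + i - j = t + i - k := by omega
  rw [e2, this, ← e1]

lemma le_mbrd {l : List Char} {m k : Nat} (h : BrdP l m k) : k ≤ mbrd l m :=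
  Nat.le_findGreatest (by have := h.1; omega) ((brdB_iff l m k).mpr h)

lemma mbrd_lt {l : List Char} {m : Nat} (hm : 0 < m) : mbrd l m < m := by
  have := Nat.findGreatest_le (P := fun k => brdB l m k = true) (m - 1)
  unfold mbrd; omega

lemma brdP_mbrd (l : List Char) {m : Nat} (hm : 0 < m) : BrdP l m (mbrd l m) := by
  by_cases h : mbrd l m = 0
  · rw [h]; exact brdP_zero l m hm
  · have := Nat.findGreatest_spec (P := fun k => brdB l m k = true)
      (m := 0) (n := m - 1) (Nat.zero_le _) ((brdB_iff l m 0).mpr (brdP_zero l m hm))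
    exact (brdB_iff l m _).mp this

-- border growth step: for 1 ≤ k ≤ m, k borders the (m+1)-prefix iff k-1 borders
-- the m-prefix and the characters at k-1 and m agree
lemma brdP_succ_iff {l : List Char} {m k : Nat} (hk : 1 ≤ k) (hkm : k ≤ m) :
    BrdP l (m + 1) k ↔ BrdP l m (k - 1) ∧ l.getD (k - 1) ' ' = l.getD m ' ' := by
  constructor
  · rintro ⟨_, H⟩
    refine ⟨⟨by omega, fun t ht => ?_⟩, ?_⟩
    · have := H t (by omega)
      have e : t + (m + 1) - k = t + m - (k - 1) := by omega
      rwa [e] at this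
    · have := H (k - 1) (by omega)
      have e : k - 1 + (m + 1) - k = m := by omega
      rwa [e] at this
  · rintro ⟨⟨_, H⟩, hc⟩
    refine ⟨by omega, fun t ht => ?_⟩
    by_cases he : t = k - 1
    · subst he
      have e : k - 1 + (m + 1) - k = m := by omega
      rwa [e]
    · have := H t (by omega)
      have e : t + m - (k - 1) = t + (m + 1) - k := by omega
      rwa [e] at this

-- invariant of the inner while loop at outer index i
def WInv (l : List Char) (i j : Nat) : Prop :=
  BrdP l i j ∧ ∀ k, BrdP l i k → j < k → l.getD k ' ' ≠ l.getD i ' '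

-- table-correctness hypothesis: lps is right below index i
def TblOk (l : List Char) (lps : List Nat) (i : Nat) : Prop :=
  ∀ m, m < i → lps.getD m 0 = mbrd l (m + 1)

lemma pvKmpWhile_spec (l : List Char) (lps : List Nat) (i : Nat)
    (htbl : TblOk l lps i) :
    ∀ fuel j, j ≤ fuel → WInv l i j →
      WInv l i (pvKmpWhile l lps (l.getD i ' ') fuel j) ∧
      (pvKmpWhile l lps (l.getD i ' ') fuel j = 0 ∨
        l.getD (pvKmpWhile l lps (l.getD i ' ') fuel j) ' ' = l.getD i ' ') := by
  intro fuel
  induction fuel with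
  | zero => intro j hj hw; interval_cases j; exact ⟨hw, Or.inl rfl⟩
  | succ f ih =>
    intro j hj hw
    rw [pvKmpWhile]
    split
    · next hcond =>
      obtain ⟨hjne, hne⟩ := hcond
      obtain ⟨hbj, hskip⟩ := hw
      have hj1 : 0 < j := Nat.pos_of_ne_zero hjne
      have hji : j < i := hbj.1
      have hentry : lps.getD (j - 1) 0 = mbrd l j := by
        have := htbl (j - 1) (by omega)
        rwa [Nat.sub_add_cancel hj1] at this
      rw [hentry]
      have hmb : BrdP l j (mbrd l j) := brdP_mbrd l hj1
      have hmlt : mbrd l j < j := mbrd_lt hj1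
      refine ih (mbrd l j) (by omega) ⟨brdP_trans hbj hmb, ?_⟩
      intro k hk hkgt
      by_cases hkj : k = j
      · subst hkj; exact hne
      · by_cases hkgtj : j < k
        · exact hskip k hk hkgtj
        · exfalso
          have hkltj : k < j := by omega
          have : BrdP l j k := brdP_of_lt hk hbj hkltj
          have := le_mbrd this
          omega
    · next hcond =>
      refine ⟨hw, ?_⟩
      by_cases h0 : j = 0
      · exact Or.inl h0
      · right
        by_contra hne
        exact hcond ⟨h0, hne⟩

-- full loop invariant: state after all outer indices < i are processed
def KInv (l : List Char) (i : Nat) (st : List Nat × Nat) : Prop :=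
  st.1.length = l.length ∧ TblOk l st.1 i ∧
  (∀ m, i ≤ m → m < l.length → st.1.getD m 0 = 0) ∧ st.2 = mbrd l i

lemma getD_set_self {xs : List Nat} {i a : Nat} (h : i < xs.length) :
    (xs.set i a).getD i 0 = a := by
  simp [List.getD_eq_getElem?_getD, List.getElem?_set_self h]

lemma getD_set_ne (xs : List Nat) (i a m : Nat) (h : m ≠ i) :
    (xs.set i a).getD m 0 = xs.getD m 0 := by
  simp [List.getD_eq_getElem?_getD, List.getElem?_set_ne (Ne.symm h)]

lemma pvKmpStep_inv {l : List Char} {i : Nat} {st : List Nat × Nat}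
    (hi : 1 ≤ i) (hin : i < l.length) (hinv : KInv l i st) :
    KInv l (i + 1) (pvKmpStep l st i) := by
  obtain ⟨hlen, htbl, hzero, hj⟩ := hinv
  have hwinv : WInv l i st.2 := by
    rw [hj]
    refine ⟨brdP_mbrd l (by omega), ?_⟩
    intro k hk hgt
    exact absurd (le_mbrd hk) (by omega)
  obtain ⟨⟨hbj1, hskip⟩, hstop⟩ :=
    pvKmpWhile_spec l st.1 i htbl st.2 st.2 le_rfl hwinv
  set j1 := pvKmpWhile l st.1 (l.getD i ' ') st.2 st.2 with hj1def
  have hj1lt : j1 < i := hbj1.1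
  simp only [pvKmpStep]
  rw [← hj1def]
  split
  · next hmatch =>
    -- match: lps[i] := j1+1 and mbrd l (i+1) = j1+1
    have hnew : mbrd l (i + 1) = j1 + 1 := by
      have hmem : BrdP l (i + 1) (j1 + 1) := by
        rw [brdP_succ_iff (by omega) (by omega)]
        simpa using ⟨hbj1, hmatch.symm⟩
      have hle : j1 + 1 ≤ mbrd l (i + 1) := le_mbrd hmem
      have hge : mbrd l (i + 1) ≤ j1 + 1 := by
        by_contra hgt
        have hb := brdP_mbrd l (m := i + 1) (by omega)
        have hlt := mbrd_lt (l := l) (m := i + 1) (by omega)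
        rw [brdP_succ_iff (by omega) (by omega)] at hb
        exact hskip _ hb.1 (by omega) hb.2
      omega
    refine ⟨by simpa using hlen, ?_, ?_, by simpa using hnew.symm⟩
    · intro m hm
      by_cases he : m = i
      · subst he
        rw [hnew]
        exact getD_set_self (hlen ▸ hin)
      · rw [getD_set_ne _ _ _ _ he]
        exact htbl m (by omega)
    · intro m hm hmn
      rw [getD_set_ne _ _ _ _ (by omega)]
      exact hzero m (by omega) hmn
  · next hmatch =>
    -- no match: j1 = 0, l[0] ≠ l[i], and mbrd l (i+1) = 0
    have hj10 : j1 = 0 := by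
      rcases hstop with h | h
      · exact h
      · exact absurd h.symm hmatch
    have hnew : mbrd l (i + 1) = 0 := by
      by_contra h0
      have hb := brdP_mbrd l (m := i + 1) (by omega)
      have hlt := mbrd_lt (l := l) (m := i + 1) (by omega)
      rw [brdP_succ_iff (by omega) (by omega)] at hb
      by_cases hz : mbrd l (i + 1) - 1 = 0
      · rw [hz] at hb
        rw [hj10] at hmatch
        exact hmatch hb.2.symm
      · exact hskip _ hb.1 (by omega) hb.2
    refine ⟨hlen, ?_, fun m hm hmn => hzero m (by omega) hmn, ?_⟩
    · intro m hm
      by_cases he : m = i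
      · subst he
        rw [hzero m le_rfl hin, hnew]
      · exact htbl m (by omega)
    · simpa using hj10 ▸ hnew.symm

lemma kmp_fold (l : List Char) :
    ∀ cnt i st, 1 ≤ i → i + cnt ≤ l.length → KInv l i st →
      KInv l (i + cnt) ((List.range' i cnt).foldl (pvKmpStep l) st) := by
  intro cnt
  induction cnt with
  | zero => intro i st _ _ h; simpa using h
  | succ c ih =>
    intro i st hi hle h
    rw [List.range'_succ, List.foldl_cons]
    have := ih (i + 1) (pvKmpStep l st i) (by omega) (by omega)
      (pvKmpStep_inv hi (by omega) h)
    simpa [Nat.add_assoc, Nat.add_comm 1 c] using this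

lemma lps_last (l : List Char) (hn : 0 < l.length) :
    ((List.range' 1 (l.length - 1)).foldl (pvKmpStep l)
      (List.replicate l.length 0, 0)).1.getD (l.length - 1) 0 = mbrd l l.length := by
  have hinit : KInv l 1 (List.replicate l.length 0, 0) := by
    refine ⟨by simp, ?_, fun m _ _ => by simp, ?_⟩
    · intro m hm
      interval_cases m
      simp [mbrd]
    · simp [mbrd]
  have := kmp_fold l (l.length - 1) 1 _ le_rfl (by omega) hinit
  rw [show 1 + (l.length - 1) = l.length by omega] at this
  obtain ⟨_, htbl, _, _⟩ := this
  have := htbl (l.length - 1) (by omega)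
  rwa [show l.length - 1 + 1 = l.length by omega] at this

-- B's overlap test at shift p is the border test at length n - p
lemma drop_take_iff_brdP (l : List Char) (p : Nat) (hp : 1 ≤ p)
    (hpn : p ≤ l.length) :
    (l.drop p = l.take (l.length - p)) ↔ BrdP l l.length (l.length - p) := by
  set n := l.length with hn
  constructor
  · intro h
    refine ⟨by omega, fun t ht => ?_⟩
    have h1 : l[p + t]? = l[t]? := by
      have := congrArg (fun xs => xs[t]?) h
      simpa [List.getElem?_drop, List.getElem?_take, ht] using this
    have e : t + n - (n - p) = p + t := by omega
    rw [List.getD_eq_getElem?_getD, List.getD_eq_getElem?_getD, e, h1]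
  · rintro ⟨_, H⟩
    apply List.ext_getElem?
    intro i
    rw [List.getElem?_drop, List.getElem?_take]
    by_cases hi : i < n - p
    · rw [if_pos hi]
      have := H i hi
      have e : i + n - (n - p) = p + i := by omega
      rw [e, List.getD_eq_getElem l ' ' (by omega),
        List.getD_eq_getElem l ' ' (by omega)] at this
      rw [List.getElem?_eq_getElem (by omega), List.getElem?_eq_getElem (by omega),
        this]
    · rw [if_neg hi, List.getElem?_eq_none (by omega)]

lemma pvFindP_aux (l : List Char) (hn : 0 < l.length) :
    ∀ d p, d = l.length - p → 1 ≤ p → p ≤ l.length →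
      (∀ q, 1 ≤ q → q < p → ¬ BrdP l l.length (l.length - q)) →
      pvFindP l l.length p = l.length - mbrd l l.length := by
  intro d
  induction d with
  | zero =>
    intro p hd hp1 hpn hmin
    have hpe : p = l.length := by omega
    subst hpe
    rw [pvFindP, dif_pos le_rfl, if_pos (by simp)]
    have hmb : mbrd l l.length = 0 := by
      by_contra h0
      have hb := brdP_mbrd l hn
      have hlt := mbrd_lt (l := l) hn
      have := hmin (l.length - mbrd l l.length) (by omega) (by omega)
      rw [show l.length - (l.length - mbrd l l.length) = mbrd l l.length by omega] at this
      exact this hb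
    omega
  | succ d ih =>
    intro p hd hp1 hpn hmin
    rw [pvFindP, dif_pos hpn]
    split
    · next heq =>
      have hb := (drop_take_iff_brdP l p hp1 hpn).mp heq
      have hle := le_mbrd hb
      have hge : mbrd l l.length ≤ l.length - p := by
        by_contra h0
        have hmb := brdP_mbrd l hn
        have hlt := mbrd_lt (l := l) hn
        have := hmin (l.length - mbrd l l.length) (by omega) (by omega)
        rw [show l.length - (l.length - mbrd l l.length) = mbrd l l.length by omega] at this
        exact this hmb
      omega
    · next hne =>
      refine ih (p + 1) (by omega) (by omega) (by omega) ?_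
      intro q hq1 hq2
      by_cases hqp : q = p
      · subst hqp
        exact fun hb => hne ((drop_take_iff_brdP l q hq1 hpn).mpr hb)
      · exact hmin q hq1 (by omega)

lemma pvFindP_eq (l : List Char) (hn : 0 < l.length) :
    pvFindP l l.length 1 = l.length - mbrd l l.length :=
  pvFindP_aux l hn (l.length - 1) 1 rfl le_rfl hn (by omega)

-- ===== VERDICT (by name: the statement is the Claim_ definition above) =====
theorem minimal_repeating_unit_py_spec : Claim_equal_minimal_repeating_unit_py := by
  intro s _
  unfold Spec_minimal_repeating_unit_py
  unfold minimal_repeating_unit_py minimal_repeating_unit_py_alt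
  set l := s.toList with hl
  by_cases hn : l.length = 0
  · simp [hn]
  · have h0 : 0 < l.length := Nat.pos_of_ne_zero hn
    simp only [if_neg hn]
    rw [lps_last l h0, pvFindP_eq l h0]
    have hlt := mbrd_lt (l := l) h0
    set p := l.length - mbrd l l.length with hp
    have hpne : p ≠ 0 := by omega
    by_cases hdvd : l.length % p = 0
    · rw [if_pos ⟨hpne, hdvd⟩, if_pos hdvd]
    · rw [if_neg (by tauto), if_neg hdvd]
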